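-- pv_equiv track=rewrite | github.com/draju1980/Hello-World | string_fun_exe2.py | _remove_trailing_whitespace_sample_
-- ===== SOURCE A (Python) =====
-- def _remove_trailing_whitespace_sample_(string):
--     my_index = None
--     i = len(string)
--     while i > 0:
--         if string[i-1] != " ":
--             my_index = i
--             break
--         i = i - 1
--     # slice the string from 0 to that index
--     new_string = string[:my_index]
--     return new_string
-- ===== SOURCE B (Python) =====
-- def _remove_trailing_whitespace_sample_(string):
--     # Single forward pass: remember the position just past the last non-space char.
--     end = 0
--     for i, ch in enumerate(string):
--         if ch != " ":
--             end = i + 1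
--     return string[:end]
-- ===== Notes on version B (the rewrite author's own statement) =====
-- stated objective: alternative
-- what changed: Replaces the backward while-loop with early break and an Optional slice index by a single forward pass that keeps 'position just past the last non-space character' (default 0), so a nonempty all-space string correctly becomes empty.
-- intended difference: On nonempty strings consisting only of spaces A's index stays None and string[:None] returns the whole unmodified string, while B returns the empty string, which is the intended result of removing trailing spaces. — e.g. on _remove_trailing_whitespace_sample_(" "): A returns " ", B returns ""
import Mathlib
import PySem

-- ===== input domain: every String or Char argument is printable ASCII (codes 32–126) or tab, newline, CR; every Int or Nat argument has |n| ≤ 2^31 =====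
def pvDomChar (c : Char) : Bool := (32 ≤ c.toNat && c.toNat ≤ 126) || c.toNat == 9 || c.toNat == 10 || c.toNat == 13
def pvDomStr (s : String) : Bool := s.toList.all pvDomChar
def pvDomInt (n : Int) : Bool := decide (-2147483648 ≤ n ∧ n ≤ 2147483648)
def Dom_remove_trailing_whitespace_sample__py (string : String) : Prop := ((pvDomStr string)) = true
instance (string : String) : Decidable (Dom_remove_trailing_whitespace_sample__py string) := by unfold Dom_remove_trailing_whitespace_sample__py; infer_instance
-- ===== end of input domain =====

-- B replaces A's backward while-loop (early break, Optional slice index) by a single forward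
-- pass keeping the position just past the last non-space character (default 0); on nonempty
-- all-space strings A returns the whole string while B returns "" (the intended value) — see D_.


-- ===== PORT A =====
-- A's while-loop: i runs from len(string) down to 1, breaking with my_index = i at the
-- first (i.e. rightmost) position with string[i-1] != " "; my_index stays None otherwise.
def pvALoop (s : List Char) : Nat → Option Int
  | 0 => none
  | j + 1 =>
    if PySem.List.pyGetD s (((j + 1 : Nat) : Int) - 1) ' ' ≠ ' ' then some ((j + 1 : Nat) : Int)
    else pvALoop s j

def remove_trailing_whitespace_sample__py (string : String) : String :=
  let my_index := pvALoop string.toList string.toList.length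
  PySem.Str.slice string none my_index

-- ===== PORT B =====
-- B's forward pass: end = 0; for i, ch in enumerate(string): if ch != " ": end = i + 1.
def pvBEnd (s : List Char) : Int :=
  (PySem.List.enumerate s 0).foldl (fun e p => if p.2 ≠ ' ' then p.1 + 1 else e) 0

def remove_trailing_whitespace_sample__py_alt (string : String) : String :=
  PySem.Str.slice string none (some (pvBEnd string.toList))

-- ===== PRECONDITION & SPEC =====
-- On nonempty strings consisting only of spaces, A's index stays None and string[:None]
-- returns the whole string; B returns "", the intended result of removing trailing spaces.
def D_remove_trailing_whitespace_sample__py (string : String) : Prop :=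
  string.toList ≠ [] ∧ string.toList.all (· == ' ') = true
instance (string : String) : Decidable (D_remove_trailing_whitespace_sample__py string) := by
  unfold D_remove_trailing_whitespace_sample__py; infer_instance
def Spec_remove_trailing_whitespace_sample__py (string : String) (out : String) : Prop :=
  ¬ D_remove_trailing_whitespace_sample__py string → out = remove_trailing_whitespace_sample__py_alt string
instance (string : String) (out : String) : Decidable (Spec_remove_trailing_whitespace_sample__py string out) := by
  unfold Spec_remove_trailing_whitespace_sample__py; infer_instance
def pvDiffWitness_remove_trailing_whitespace_sample__py : String := "  "
def pvDiffWitnessOut_remove_trailing_whitespace_sample__py : String × String := ("  ", "")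

-- ===== CLAIM (what is proved, stated in full; the proofs are below) =====
def Claim_unchanged_remove_trailing_whitespace_sample__py : Prop := ∀ (string : String), Dom_remove_trailing_whitespace_sample__py string → Spec_remove_trailing_whitespace_sample__py string (remove_trailing_whitespace_sample__py string)
def Claim_changed_remove_trailing_whitespace_sample__py : Prop := Dom_remove_trailing_whitespace_sample__py (pvDiffWitness_remove_trailing_whitespace_sample__py) ∧ D_remove_trailing_whitespace_sample__py (pvDiffWitness_remove_trailing_whitespace_sample__py) ∧ remove_trailing_whitespace_sample__py (pvDiffWitness_remove_trailing_whitespace_sample__py) = pvDiffWitnessOut_remove_trailing_whitespace_sample__py.1 ∧ remove_trailing_whitespace_sample__py_alt (pvDiffWitness_remove_trailing_whitespace_sample__py) = pvDiffWitnessOut_remove_trailing_whitespace_sample__py.2 ∧ pvDiffWitnessOut_remove_trailing_whitespace_sample__py.1 ≠ pvDiffWitnessOut_remove_trailing_whitespace_sample__py.2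
def Claim_exact_remove_trailing_whitespace_sample__py : Prop := ∀ (string : String), Dom_remove_trailing_whitespace_sample__py string → D_remove_trailing_whitespace_sample__py string → remove_trailing_whitespace_sample__py string ≠ remove_trailing_whitespace_sample__py_alt string

-- ===== LEMMAS AND PROOFS =====

-- extending the string on the right does not change A's loop for counters within the old part
lemma pvALoop_append (s : List Char) (c : Char) (i : Nat) (h : i ≤ s.length) :
    pvALoop (s ++ [c]) i = pvALoop s i := by
  induction i with
  | zero => rfl
  | succ j ih =>
    have hj : ((j + 1 : Nat) : Int) - 1 = ((j : Nat) : Int) := by push_cast; ring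
    have hlt : j < s.length := h
    rw [pvALoop, pvALoop, hj]
    rw [PySem.List.pyGetD_natCast, PySem.List.pyGetD_natCast, List.getD, List.getD,
      List.getElem?_append_left hlt, ih (Nat.le_of_lt hlt)]

lemma pvBEnd_append (s : List Char) (c : Char) :
    pvBEnd (s ++ [c]) = if c ≠ ' ' then (s.length : Int) + 1 else pvBEnd s := by
  by_cases h : c = ' ' <;>
    simp [pvBEnd, PySem.List.enumerate_append, PySem.List.enumerate_cons,
      PySem.List.enumerate_nil, List.foldl_append, h]

-- A's loop (run with counter = length) and B's fold agree: either the string is all spaces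
-- (A: none, B: 0) or A returns exactly B's end position.
lemma pvQ (s : List Char) :
    (pvALoop s s.length = none ∧ pvBEnd s = 0 ∧ ∀ c ∈ s, c = ' ')
    ∨ (pvALoop s s.length = some (pvBEnd s) ∧ ∃ c ∈ s, c ≠ ' ') := by
  induction s using List.reverseRecOn with
  | nil => left; exact ⟨rfl, rfl, by simp⟩
  | append_singleton s c ih =>
    have hlen : (s ++ [c]).length = s.length + 1 := by simp
    have hj : ((s.length + 1 : Nat) : Int) - 1 = ((s.length : Nat) : Int) := by push_cast; ring
    by_cases hc : c = ' '
    · -- last char is a space: both sides reduce to the prefix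
      subst hc
      have hA : pvALoop (s ++ [' ']) (s.length + 1) = pvALoop s s.length := by
        rw [pvALoop, hj, PySem.List.pyGetD_natCast, List.getD,
          List.getElem?_append_right le_rfl]
        simp [pvALoop_append s ' ' s.length le_rfl]
      have hB : pvBEnd (s ++ [' ']) = pvBEnd s := by simp [pvBEnd_append]
      rw [hlen, hA, hB]
      rcases ih with ⟨h1, h2, h3⟩ | ⟨h1, h2⟩
      · left
        refine ⟨h1, h2, ?_⟩
        intro x hx
        rcases List.mem_append.mp hx with hx | hx
        · exact h3 x hx
        · simpa using hx
      · right
        exact ⟨h1, by rcases h2 with ⟨x, hx, hxne⟩; exact ⟨x, List.mem_append.mpr (Or.inl hx), hxne⟩⟩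
    · -- last char is not a space: A breaks immediately, B's fold ends at length + 1
      right
      constructor
      · rw [hlen, pvALoop, hj, PySem.List.pyGetD_natCast, List.getD,
          List.getElem?_append_right le_rfl, pvBEnd_append]
        simp [hc]
      · exact ⟨c, List.mem_append.mpr (Or.inr (by simp)), hc⟩

-- ===== VERDICT (by name: the statement is the Claim_ definition above) =====
theorem remove_trailing_whitespace_sample__py_spec : Claim_unchanged_remove_trailing_whitespace_sample__py := by
  intro string _ hnD
  rcases pvQ string.toList with ⟨h1, h2, h3⟩ | ⟨h1, _⟩ <;>
    rw [String.length_toList] at h1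
  · -- all spaces: outside D_ this forces the empty string, where both sides are ""
    have hnil : string.toList = [] := by
      by_contra hne
      exact hnD ⟨hne, List.all_eq_true.mpr fun c hc => by simpa using h3 c hc⟩
    apply String.toList_inj.mp
    simp only [remove_trailing_whitespace_sample__py, remove_trailing_whitespace_sample__py_alt,
      PySem.Str.toList_slice, PySem.Chars.slice_eq_listSlice, hnil]
    simp [PySem.List.slice]
  · simp only [remove_trailing_whitespace_sample__py, remove_trailing_whitespace_sample__py_alt,
      String.length_toList, h1]

theorem remove_trailing_whitespace_sample__py_changed : Claim_changed_remove_trailing_whitespace_sample__py := by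
  unfold Claim_changed_remove_trailing_whitespace_sample__py
  exact ⟨by decide, by decide, by decide, by decide, by decide⟩

theorem remove_trailing_whitespace_sample__py_tight : Claim_exact_remove_trailing_whitespace_sample__py := by
  intro string _ hD heq
  rcases hD with ⟨hne, hallb⟩
  have hall : ∀ c ∈ string.toList, c = ' ' := by simpa using hallb
  rcases pvQ string.toList with ⟨h1, h2, _⟩ | ⟨_, x, hx, hxne⟩
  · rw [String.length_toList] at h1
    have := congrArg String.toList heq
    simp only [remove_trailing_whitespace_sample__py, remove_trailing_whitespace_sample__py_alt,
      PySem.Str.toList_slice, PySem.Chars.slice_eq_listSlice, String.length_toList,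
      h1, h2, PySem.List.slice_none_none] at this
    simp [PySem.List.slice] at this
    exact hne (by rw [this]; rfl)
  · exact hxne (hall x hx)
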